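-- pv_equiv track=rewrite | github.com/CyberNet-Works/progress_tracker | Python/python_competition/sets/distinct_pos_vs_negs.py | positive_dominant
-- ===== SOURCE A (Python) =====
-- def positive_dominant(lst):
--
--     pos = set()
--     neg = set()
--
--     for num in lst:
--         if num < 0:
--             neg.add(num)
--         elif num > 0:
--             pos.add(num)
--
--     return len(pos) > len(neg)
-- ===== SOURCE B (Python) =====
-- def positive_dominant(lst):
--     s = sorted(lst)
--     negc = 0
--     posc = 0
--     prev = None
--     for x in s:
--         if prev is None or x != prev:
--             if x < 0:
--                 negc += 1
--             elif x > 0: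
--                 posc += 1
--             prev = x
--     return posc > negc
-- ===== Notes on version B (the rewrite author's own statement) =====
-- stated objective: alternative
-- what changed: Replaces A's two hash-set deduplication passes with a sort of the input followed by a single adjacency scan that counts distinct negatives and positives (duplicates are adjacent after sorting).
import Mathlib
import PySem

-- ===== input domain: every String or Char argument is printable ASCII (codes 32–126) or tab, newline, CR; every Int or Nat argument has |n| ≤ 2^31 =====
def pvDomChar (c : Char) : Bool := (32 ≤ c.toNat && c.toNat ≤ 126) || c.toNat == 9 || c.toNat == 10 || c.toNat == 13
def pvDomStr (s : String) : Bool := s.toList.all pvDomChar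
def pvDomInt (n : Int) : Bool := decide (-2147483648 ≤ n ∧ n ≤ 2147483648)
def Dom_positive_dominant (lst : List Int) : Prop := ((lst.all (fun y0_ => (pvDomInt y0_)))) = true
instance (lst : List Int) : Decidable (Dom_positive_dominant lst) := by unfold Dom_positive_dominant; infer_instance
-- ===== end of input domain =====

-- B replaces A's two hash-set dedup with a single sort followed by one adjacency scan counting
-- distinct negatives and positives (objective: alternative decomposition, not claimed faster).

-- ===== PORT A =====
-- loop body of A: add num to neg / pos set by sign
def pdStepA (st : PySem.Set Int × PySem.Set Int) (num : Int) : PySem.Set Int × PySem.Set Int :=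
  if num < 0 then (st.1, PySem.Set.add st.2 num)
  else if num > 0 then (PySem.Set.add st.1 num, st.2)
  else st

def positive_dominant (lst : List Int) : Bool :=
  let st := lst.foldl pdStepA (PySem.Set.empty, PySem.Set.empty)
  decide (PySem.Set.len st.1 > PySem.Set.len st.2)

-- ===== PORT B =====
-- loop body of B: state = (prev, negc, posc); count x when it differs from prev
def pdStepB (st : Option Int × Int × Int) (x : Int) : Option Int × Int × Int :=
  if st.1 ≠ some x then
    if x < 0 then (some x, st.2.1 + 1, st.2.2)
    else if x > 0 then (some x, st.2.1, st.2.2 + 1)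
    else (some x, st.2.1, st.2.2)
  else st

def positive_dominant_alt (lst : List Int) : Bool :=
  let s := PySem.List.sorted lst (fun x => x) false
  let st := s.foldl pdStepB (none, 0, 0)
  decide (st.2.2 > st.2.1)

-- ===== PRECONDITION & SPEC =====
def Spec_positive_dominant (lst : List Int) (out : Bool) : Prop := out = positive_dominant_alt lst
instance (lst : List Int) (out : Bool) : Decidable (Spec_positive_dominant lst out) := by unfold Spec_positive_dominant; infer_instance

-- ===== CLAIM (what is proved, stated in full; the proofs are below) =====
def Claim_equal_positive_dominant : Prop := ∀ (lst : List Int), Dom_positive_dominant lst → Spec_positive_dominant lst (positive_dominant lst)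

-- ===== LEMMAS AND PROOFS =====

-- A's fold splits into the two independent set-building folds over the sign-filtered lists.
lemma pd_foldA_split (lst : List Int) (p n : PySem.Set Int) :
    lst.foldl pdStepA (p, n) =
      ((lst.filter (fun x => decide (0 < x))).foldl PySem.Set.add p,
       (lst.filter (fun x => decide (x < 0))).foldl PySem.Set.add n) := by
  induction lst generalizing p n with
  | nil => rfl
  | cons y rest ih =>
    rcases lt_trichotomy y 0 with h | h | h
    · simp [pdStepA, h, not_lt.mpr h.le, ih]
    · subst h; simp [pdStepA, ih]
    · simp [pdStepA, h, not_lt.mpr h.le, ih]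

-- a PySem set built from a list has as many elements as the list has distinct elements
lemma pd_ofList_length (xs : List Int) :
    (PySem.Set.ofList xs).length = xs.toFinset.card := by
  have hnd := PySem.Set.nodup_ofList xs
  have hfs : (PySem.Set.ofList xs : List Int).toFinset = xs.toFinset := by
    ext z; simp [List.mem_toFinset, PySem.Set.mem_ofList]
  rw [← hfs, List.toFinset_card_of_nodup hnd]

-- B's scan, started after a first element prev, counts the distinct negatives/positives of the
-- remaining sorted tail that differ from prev.
lemma pd_insert_card (T : Finset Int) (y : Int) : (insert y T).card = (T.erase y).card + 1 := by
  rw [show insert y T = insert y (T.erase y) from by ext z; simp; tauto]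
  exact Finset.card_insert_of_notMem (Finset.notMem_erase _ _)

lemma pd_scan_inv (s : List Int) :
    ∀ (prev negc posc : Int), s.Pairwise (· ≤ ·) → (∀ x ∈ s, prev ≤ x) →
    (s.foldl pdStepB (some prev, negc, posc)).2 =
      (negc + (((s.filter (fun x => decide (x < 0))).toFinset.erase prev).card : Int),
       posc + (((s.filter (fun x => decide (0 < x))).toFinset.erase prev).card : Int)) := by
  induction s with
  | nil => intro prev negc posc _ _; simp
  | cons y rest ih =>
    intro prev negc posc hpw hlo
    have hyrest : ∀ z ∈ rest, y ≤ z := (List.pairwise_cons.mp hpw).1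
    have hpr : rest.Pairwise (· ≤ ·) := (List.pairwise_cons.mp hpw).2
    have hpy : prev ≤ y := hlo y (by simp)
    by_cases hpe : prev = y
    · subst hpe
      have hstep : pdStepB (some prev, negc, posc) prev = (some prev, negc, posc) := by
        simp [pdStepB]
      rw [List.foldl_cons, hstep, ih prev negc posc hpr hyrest]
      rcases lt_trichotomy prev 0 with h | h | h
      · have fneg : (prev :: rest).filter (fun x => decide (x < 0))
            = prev :: rest.filter (fun x => decide (x < 0)) := List.filter_cons_of_pos (by simpa using h)
        have fpos : (prev :: rest).filter (fun x => decide (0 < x))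
            = rest.filter (fun x => decide (0 < x)) := List.filter_cons_of_neg (by simp; omega)
        rw [fneg, fpos, List.toFinset_cons, Finset.erase_insert_eq_erase]
      · subst h
        have fneg : ((0 : Int) :: rest).filter (fun x => decide (x < 0))
            = rest.filter (fun x => decide (x < 0)) := List.filter_cons_of_neg (by simp)
        have fpos : ((0 : Int) :: rest).filter (fun x => decide (0 < x))
            = rest.filter (fun x => decide (0 < x)) := List.filter_cons_of_neg (by simp)
        rw [fneg, fpos]
      · have fneg : (prev :: rest).filter (fun x => decide (x < 0))
            = rest.filter (fun x => decide (x < 0)) := List.filter_cons_of_neg (by simp; omega)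
        have fpos : (prev :: rest).filter (fun x => decide (0 < x))
            = prev :: rest.filter (fun x => decide (0 < x)) := List.filter_cons_of_pos (by simpa using h)
        rw [fneg, fpos, List.toFinset_cons, Finset.erase_insert_eq_erase]
    · have hplt : prev < y := lt_of_le_of_ne hpy hpe
      have hprnotin : prev ∉ rest := fun hz => absurd (hyrest prev hz) (not_le.mpr hplt)
      have hTn : prev ∉ (rest.filter (fun x => decide (x < 0))).toFinset :=
        fun hmem => hprnotin (List.mem_filter.mp (List.mem_toFinset.mp hmem)).1
      have hTp : prev ∉ (rest.filter (fun x => decide (0 < x))).toFinset :=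
        fun hmem => hprnotin (List.mem_filter.mp (List.mem_toFinset.mp hmem)).1
      rcases lt_trichotomy y 0 with h | h | h
      · have hstep : pdStepB (some prev, negc, posc) y = (some y, negc + 1, posc) := by
          simp [pdStepB, hpe, h]
        have hyTp : y ∉ (rest.filter (fun x => decide (0 < x))).toFinset := by
          intro hmem
          have := (List.mem_filter.mp (List.mem_toFinset.mp hmem)).2
          simp at this; omega
        have fneg : (y :: rest).filter (fun x => decide (x < 0))
            = y :: rest.filter (fun x => decide (x < 0)) := List.filter_cons_of_pos (by simpa using h)
        have fpos : (y :: rest).filter (fun x => decide (0 < x))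
            = rest.filter (fun x => decide (0 < x)) := List.filter_cons_of_neg (by simp; omega)
        rw [List.foldl_cons, hstep, ih y (negc + 1) posc hpr hyrest, fneg, fpos,
            List.toFinset_cons,
            Finset.erase_eq_of_notMem (s := insert y _)
              (by intro hm; rcases Finset.mem_insert.mp hm with rfl | hmem; exacts [hpe rfl, hTn hmem]),
            Finset.erase_eq_of_notMem hTp, Finset.erase_eq_of_notMem hyTp, pd_insert_card]
        simp only [Prod.mk.injEq]
        exact ⟨by push_cast; ring, trivial⟩
      · subst h
        have hstep : pdStepB (some prev, negc, posc) 0 = (some 0, negc, posc) := by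
          simp [pdStepB, hpe]
        have h0n : (0 : Int) ∉ (rest.filter (fun x => decide (x < 0))).toFinset := by
          intro hmem
          have := (List.mem_filter.mp (List.mem_toFinset.mp hmem)).2
          simp at this
        have h0p : (0 : Int) ∉ (rest.filter (fun x => decide (0 < x))).toFinset := by
          intro hmem
          have := (List.mem_filter.mp (List.mem_toFinset.mp hmem)).2
          simp at this
        have fneg : ((0 : Int) :: rest).filter (fun x => decide (x < 0))
            = rest.filter (fun x => decide (x < 0)) := List.filter_cons_of_neg (by simp)
        have fpos : ((0 : Int) :: rest).filter (fun x => decide (0 < x))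
            = rest.filter (fun x => decide (0 < x)) := List.filter_cons_of_neg (by simp)
        rw [List.foldl_cons, hstep, ih 0 negc posc hpr hyrest, fneg, fpos,
            Finset.erase_eq_of_notMem h0n, Finset.erase_eq_of_notMem h0p,
            Finset.erase_eq_of_notMem hTn, Finset.erase_eq_of_notMem hTp]
      · have hstep : pdStepB (some prev, negc, posc) y = (some y, negc, posc + 1) := by
          simp [pdStepB, hpe, h, not_lt.mpr h.le]
        have hyTn : y ∉ (rest.filter (fun x => decide (x < 0))).toFinset := by
          intro hmem
          have := (List.mem_filter.mp (List.mem_toFinset.mp hmem)).2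
          simp at this; omega
        have fneg : (y :: rest).filter (fun x => decide (x < 0))
            = rest.filter (fun x => decide (x < 0)) := List.filter_cons_of_neg (by simp; omega)
        have fpos : (y :: rest).filter (fun x => decide (0 < x))
            = y :: rest.filter (fun x => decide (0 < x)) := List.filter_cons_of_pos (by simpa using h)
        rw [List.foldl_cons, hstep, ih y negc (posc + 1) hpr hyrest, fneg, fpos,
            List.toFinset_cons,
            Finset.erase_eq_of_notMem (s := insert y _)
              (by intro hm; rcases Finset.mem_insert.mp hm with rfl | hmem; exacts [hpe rfl, hTp hmem]),
            Finset.erase_eq_of_notMem hTn, Finset.erase_eq_of_notMem hyTn, pd_insert_card]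
        simp only [Prod.mk.injEq]
        exact ⟨trivial, by push_cast; ring⟩

-- B's whole scan counts the distinct negatives and positives of the scanned list (sorted).
lemma pd_scan (s : List Int) (hs : s.Pairwise (· ≤ ·)) :
    (s.foldl pdStepB (none, 0, 0)).2 =
      (((s.filter (fun x => decide (x < 0))).toFinset.card : Int),
       ((s.filter (fun x => decide (0 < x))).toFinset.card : Int)) := by
  cases s with
  | nil => simp
  | cons x rest =>
    have hxrest : ∀ z ∈ rest, x ≤ z := (List.pairwise_cons.mp hs).1
    have hpr : rest.Pairwise (· ≤ ·) := (List.pairwise_cons.mp hs).2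
    rcases lt_trichotomy x 0 with h | h | h
    · have hstep : pdStepB (none, 0, 0) x = (some x, 1, 0) := by simp [pdStepB, h]
      have hxTp : x ∉ (rest.filter (fun t => decide (0 < t))).toFinset := by
        intro hmem
        have := (List.mem_filter.mp (List.mem_toFinset.mp hmem)).2
        simp at this; omega
      have fneg : (x :: rest).filter (fun t => decide (t < 0))
          = x :: rest.filter (fun t => decide (t < 0)) := List.filter_cons_of_pos (by simpa using h)
      have fpos : (x :: rest).filter (fun t => decide (0 < t))
          = rest.filter (fun t => decide (0 < t)) := List.filter_cons_of_neg (by simp; omega)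
      rw [List.foldl_cons, hstep, pd_scan_inv rest x 1 0 hpr hxrest, fneg, fpos,
          List.toFinset_cons, Finset.erase_eq_of_notMem hxTp, pd_insert_card]
      simp only [Prod.mk.injEq]
      constructor <;> omega
    · subst h
      have hstep : pdStepB (none, 0, 0) 0 = (some 0, 0, 0) := by simp [pdStepB]
      have h0n : (0 : Int) ∉ (rest.filter (fun t => decide (t < 0))).toFinset := by
        intro hmem
        have := (List.mem_filter.mp (List.mem_toFinset.mp hmem)).2
        simp at this
      have h0p : (0 : Int) ∉ (rest.filter (fun t => decide (0 < t))).toFinset := by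
        intro hmem
        have := (List.mem_filter.mp (List.mem_toFinset.mp hmem)).2
        simp at this
      have fneg : ((0 : Int) :: rest).filter (fun t => decide (t < 0))
          = rest.filter (fun t => decide (t < 0)) := List.filter_cons_of_neg (by simp)
      have fpos : ((0 : Int) :: rest).filter (fun t => decide (0 < t))
          = rest.filter (fun t => decide (0 < t)) := List.filter_cons_of_neg (by simp)
      rw [List.foldl_cons, hstep, pd_scan_inv rest 0 0 0 hpr hxrest, fneg, fpos,
          Finset.erase_eq_of_notMem h0n, Finset.erase_eq_of_notMem h0p]
      simp
    · have hstep : pdStepB (none, 0, 0) x = (some x, 0, 1) := by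
        simp [pdStepB, h, not_lt.mpr h.le]
      have hxTn : x ∉ (rest.filter (fun t => decide (t < 0))).toFinset := by
        intro hmem
        have := (List.mem_filter.mp (List.mem_toFinset.mp hmem)).2
        simp at this; omega
      have fneg : (x :: rest).filter (fun t => decide (t < 0))
          = rest.filter (fun t => decide (t < 0)) := List.filter_cons_of_neg (by simp; omega)
      have fpos : (x :: rest).filter (fun t => decide (0 < t))
          = x :: rest.filter (fun t => decide (0 < t)) := List.filter_cons_of_pos (by simpa using h)
      rw [List.foldl_cons, hstep, pd_scan_inv rest x 0 1 hpr hxrest, fneg, fpos,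
          List.toFinset_cons, Finset.erase_eq_of_notMem hxTn, pd_insert_card]
      simp only [Prod.mk.injEq]
      constructor <;> omega

-- ===== VERDICT (by name: the statement is the Claim_ definition above) =====
theorem positive_dominant_spec : Claim_equal_positive_dominant := by
  intro lst _
  unfold Spec_positive_dominant positive_dominant positive_dominant_alt
  have hA := pd_foldA_split lst PySem.Set.empty PySem.Set.empty
  have hs := PySem.List.sorted_pairwise lst (fun x => x)
  have hB := pd_scan (PySem.List.sorted lst (fun x => x) false) hs
  have hmem := fun z => (PySem.List.sorted_perm lst (fun x => x) false).mem_iff (a := z)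
  have hfs : ∀ p : Int → Bool,
      ((PySem.List.sorted lst (fun x => x) false).filter p).toFinset = (lst.filter p).toFinset := by
    intro p; ext z; simp [hmem]
  simp only [hA, hB, hfs]
  have hlen : ∀ p : Int → Bool,
      PySem.Set.len ((lst.filter p).foldl PySem.Set.add PySem.Set.empty)
        = ((lst.filter p).toFinset.card : Int) := by
    intro p
    rw [show (lst.filter p).foldl PySem.Set.add PySem.Set.empty
          = PySem.Set.ofList (lst.filter p) from (PySem.Set.ofList_eq_foldl _).symm]
    simp [PySem.Set.len, pd_ofList_length]
  simp only [hlen]
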